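-- pv_equiv track=rewrite | github.com/jakobkhansen/KattisSolutions | trik/trik.py | trik
-- ===== SOURCE A (Python) =====
-- def trik(lines):
--     moves = lines[0]
--     cups = [1, 0, 0]
--
--     for char in moves:
--         if char == 'A':
--             temp = cups[0]
--             cups[0] = cups[1]
--             cups[1] = temp
--
--         elif char == 'B':
--             temp = cups[1]
--             cups[1] = cups[2]
--             cups[2] = temp
--
--         else:
--             temp = cups[0]
--             cups[0] = cups[2]
--             cups[2] = temp
--
--     for i in range(len(cups)):
--         if cups[i] == 1:
--             return i + 1
-- ===== SOURCE B (Python) =====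
-- # Run the shell game BACKWARDS: each move is a self-inverse transposition, so the
-- # final position of the ball is the candidate slot p whose reverse trace through
-- # the moves (right-to-left) lands on slot 0, where the ball started.
-- _PERM = {'A': (1, 0, 2), 'B': (0, 2, 1)}
--
-- def trik(lines):
--     moves = lines[0]
--     for p in range(3):
--         q = p
--         for char in reversed(moves):
--             q = _PERM.get(char, (2, 1, 0))[q]
--         if q == 0:
--             return p + 1
-- ===== Notes on version B (the rewrite author's own statement) =====
-- stated objective: alternative
-- what changed: Instead of simulating the swaps forward on a cups array, B searches over the three candidate final slots and traces each backwards through the move string (right-to-left, using a transposition table), returning the slot whose reverse trace reaches the starting slot 0; correct because each move is a self-inverse transposition.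
import Mathlib
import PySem

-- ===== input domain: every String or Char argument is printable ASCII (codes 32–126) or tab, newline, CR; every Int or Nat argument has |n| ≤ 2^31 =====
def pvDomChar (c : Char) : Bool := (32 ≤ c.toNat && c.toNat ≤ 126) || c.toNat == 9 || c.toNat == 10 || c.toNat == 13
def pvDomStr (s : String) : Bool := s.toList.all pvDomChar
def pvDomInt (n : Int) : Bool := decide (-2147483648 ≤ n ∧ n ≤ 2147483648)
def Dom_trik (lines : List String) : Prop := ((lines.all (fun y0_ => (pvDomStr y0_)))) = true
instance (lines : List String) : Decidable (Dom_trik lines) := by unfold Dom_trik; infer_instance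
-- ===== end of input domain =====

-- B replaces A's forward cups-array simulation by a reverse trace: it tries each of the
-- three candidate final slots and walks the moves right-to-left through a transposition
-- table, returning the slot whose backward trace reaches the starting slot 0.

-- ===== PORT A =====
-- the for-loop over moves, state = the cups list as a triple (cups[0], cups[1], cups[2])
def trikLoop : List Char → Int × Int × Int → Int × Int × Int
  | [], c => c
  | ch :: rest, (c0, c1, c2) =>
    trikLoop rest
      (if ch = 'A' then (c1, c0, c2)
       else if ch = 'B' then (c0, c2, c1)
       else (c2, c1, c0))

def trik (lines : List String) : Int :=
  match PySem.List.pyGet? lines 0 with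
  | none => 0   -- lines[0] raises IndexError: excluded by Pre_trik
  | some moves =>
    let (c0, c1, c2) := trikLoop moves.toList (1, 0, 0)
    -- final scan: first i with cups[i] == 1, return i+1 (always found: cups is a permutation of [1,0,0])
    if c0 = 1 then 1 else if c1 = 1 then 2 else if c2 = 1 then 3 else 0

-- ===== PORT B =====
-- _PERM.get(char, (2, 1, 0))[q]: table lookup, exact for q ∈ {0,1,2} (q never leaves it)
def permApply (ch : Char) (q : Int) : Int :=
  if ch = 'A' then (if q = 0 then 1 else if q = 1 then 0 else 2)
  else if ch = 'B' then (if q = 0 then 0 else if q = 1 then 2 else 1)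
  else (if q = 0 then 2 else if q = 1 then 1 else 0)

-- the inner loop: 'for char in reversed(moves): q = _PERM.get(char,(2,1,0))[q]'
-- (caller passes the already-reversed character list)
def backLoop : List Char → Int → Int
  | [], q => q
  | ch :: rest, q => backLoop rest (permApply ch q)

def trik_alt (lines : List String) : Int :=
  match PySem.List.pyGet? lines 0 with
  | none => 0   -- lines[0] raises IndexError: excluded by Pre_trik
  | some moves =>
    let rev := moves.toList.reverse
    -- 'for p in range(3): … if q == 0: return p + 1' (always found: the traces are bijective)
    if backLoop rev 0 = 0 then 1
    else if backLoop rev 1 = 0 then 2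
    else if backLoop rev 2 = 0 then 3
    else 0

-- ===== PRECONDITION & SPEC =====
-- A evaluates lines[0], which raises IndexError on the empty list.
def Pre_trik (lines : List String) : Prop := lines ≠ []
instance (lines : List String) : Decidable (Pre_trik lines) := by unfold Pre_trik; infer_instance
def pvWitness_trik : List String := (["ABC"])

def Spec_trik (lines : List String) (out : Int) : Prop := out = trik_alt lines
instance (lines : List String) (out : Int) : Decidable (Spec_trik lines out) := by unfold Spec_trik; infer_instance

-- ===== CLAIM (what is proved, stated in full; the proofs are below) =====
def Claim_equal_trik : Prop := ∀ (lines : List String), Dom_trik lines → Pre_trik lines → Spec_trik lines (trik lines)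

-- ===== LEMMAS AND PROOFS =====
-- component p of a cups triple, for p ∈ {0,1,2}
def getC (c : Int × Int × Int) (p : Int) : Int :=
  if p = 0 then c.1 else if p = 1 then c.2.1 else c.2.2

theorem backLoop_append (l : List Char) (ch : Char) (q : Int) :
    backLoop (l ++ [ch]) q = permApply ch (backLoop l q) := by
  induction l generalizing q with
  | nil => rfl
  | cons c rest ih => simp [backLoop, ih]

-- the value at slot p after the forward swaps equals the initial value at p's backward trace
theorem getC_trikLoop (ms : List Char) (c : Int × Int × Int) (p : Int) :
    getC (trikLoop ms c) p = getC c (backLoop ms.reverse p) := by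
  induction ms generalizing c with
  | nil => rfl
  | cons ch rest ih =>
    obtain ⟨c0, c1, c2⟩ := c
    show getC (trikLoop rest _) p = _
    rw [ih, List.reverse_cons, backLoop_append]
    set q := backLoop rest.reverse p with hq
    by_cases hA : ch = 'A' <;> by_cases hB : ch = 'B' <;>
      by_cases h0 : q = 0 <;> by_cases h1 : q = 1 <;>
        simp [getC, permApply, hA, hB, h0, h1]

-- ===== VERDICT (by name: the statement is the Claim_ definition above) =====
theorem trik_spec : Claim_equal_trik := by
  intro lines _ hpre
  unfold Spec_trik trik trik_alt
  match hlines : PySem.List.pyGet? lines 0 with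
  | none =>
    cases lines with
    | nil => exact absurd rfl hpre
    | cons x xs => simp [PySem.List.pyGet?, PySem.List.pyIdx?] at hlines
  | some moves =>
    have h0 := getC_trikLoop moves.toList (1, 0, 0) 0
    have h1 := getC_trikLoop moves.toList (1, 0, 0) 1
    have h2 := getC_trikLoop moves.toList (1, 0, 0) 2
    rcases htr : trikLoop moves.toList (1, 0, 0) with ⟨c0, c1, c2⟩
    rw [htr] at h0 h1 h2
    simp only [getC] at h0 h1 h2
    norm_num at h1 h2
    simp only [htr]
    by_cases b0 : backLoop moves.toList.reverse 0 = 0 <;>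
      by_cases b1 : backLoop moves.toList.reverse 1 = 0 <;>
        by_cases b2 : backLoop moves.toList.reverse 2 = 0 <;>
          simp [b0, b1, b2] at h0 h1 h2 <;>
            simp [h0, h1, h2, b0, b1, b2]
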